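-- pv_equiv track=rewrite | github.com/estructuras-y-programacion-itba/practica-0-tloustau-dev | main.py | verificar_jugada
-- ===== SOURCE A (Python) =====
-- def verificar_jugada(dados):
--     conteos = {}
--     for d in dados:
--         if d not in conteos:
--             conteos[d] = 0
--         conteos[d] += 1
--
--     valores = sorted(conteos.values(), reverse=True)
--     jugadas = []
--
--     if valores[0] == 5:
--         jugadas.append("G")
--     if valores[0] >= 4:
--         jugadas.append("P")
--     if valores[0] >= 3 and len(valores) >= 2 and valores[1] >= 2:
--         jugadas.append("F")
--
--     dados_unicos = sorted(set(dados))
--     if len(dados_unicos) == 5 and dados_unicos[4] - dados_unicos[0] == 4: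
--         jugadas.append("E")
--
--     return jugadas
-- ===== SOURCE B (Python) =====
-- def verificar_jugada(dados):
--     s = sorted(dados)
--     runs = []
--     if s:
--         actual = s[0]
--         cuenta = 1
--         for x in s[1:]:
--             if x == actual:
--                 cuenta += 1
--             else:
--                 runs.append(cuenta)
--                 actual = x
--                 cuenta = 1
--         runs.append(cuenta)
--
--     valores = sorted(runs, reverse=True)
--     jugadas = []
--
--     if valores[0] == 5:
--         jugadas.append("G")
--     if valores[0] >= 4:
--         jugadas.append("P")
--     if valores[0] >= 3 and len(valores) >= 2 and valores[1] >= 2: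
--         jugadas.append("F")
--
--     if len(runs) == 5 and s[-1] - s[0] == 4:
--         jugadas.append("E")
--
--     return jugadas
-- ===== Notes on version B (the rewrite author's own statement) =====
-- stated objective: alternative
-- what changed: B replaces A's counting dict and its separate set(dados) pass by one sort of the dice followed by a single run-length scan of the sorted list, from which both the count multiset and the straight test (5 runs and span 4) are read off.
import Mathlib
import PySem

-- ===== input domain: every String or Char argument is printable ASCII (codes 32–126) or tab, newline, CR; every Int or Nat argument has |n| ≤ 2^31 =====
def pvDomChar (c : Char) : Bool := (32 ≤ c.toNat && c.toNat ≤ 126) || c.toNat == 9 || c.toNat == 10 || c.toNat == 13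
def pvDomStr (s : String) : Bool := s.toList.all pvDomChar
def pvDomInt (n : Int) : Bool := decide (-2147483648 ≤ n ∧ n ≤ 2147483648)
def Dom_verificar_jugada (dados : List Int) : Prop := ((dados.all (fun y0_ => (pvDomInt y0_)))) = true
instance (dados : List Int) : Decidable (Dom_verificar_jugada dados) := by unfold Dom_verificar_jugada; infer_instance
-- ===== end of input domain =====

-- B sorts the dice once and reads the counts off a run-length scan of the sorted list, instead of A's counting dict plus a separate set(dados) pass (alternative decomposition, same asymptotic cost).

-- ===== PORT A =====
def verificar_jugada (dados : List Int) : List String :=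
  let conteos := dados.foldl (fun d x =>
      let d := if !(d.contains x) then d.insert x 0 else d
      d.insert x (d.getD x 0 + 1)) (PySem.Dict.empty : PySem.Dict Int Int)
  let valores := PySem.List.sorted conteos.values (fun v => v) true
  let jugadas : List String := []
  let jugadas := if PySem.List.pyGetD valores 0 0 = 5 then jugadas ++ ["G"] else jugadas
  let jugadas := if PySem.List.pyGetD valores 0 0 ≥ 4 then jugadas ++ ["P"] else jugadas
  let jugadas := if PySem.List.pyGetD valores 0 0 ≥ 3 ∧ 2 ≤ valores.length ∧ PySem.List.pyGetD valores 1 0 ≥ 2 then jugadas ++ ["F"] else jugadas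
  let dados_unicos := PySem.List.sorted (PySem.Set.ofList dados) (fun v => v) false
  let jugadas := if dados_unicos.length = 5 ∧ PySem.List.pyGetD dados_unicos 4 0 - PySem.List.pyGetD dados_unicos 0 0 = 4 then jugadas ++ ["E"] else jugadas
  jugadas

-- ===== PORT B =====
-- the for-loop of Source B over s[1:] with state (actual, cuenta); emits cuenta on a value change and at the end
def runScan (actual : Int) (cuenta : Int) : List Int → List Int
  | [] => [cuenta]
  | y :: ys => if y = actual then runScan actual (cuenta + 1) ys else cuenta :: runScan y 1 ys

-- the 'if s:' block of Source B: run lengths of the sorted list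
def runLengths : List Int → List Int
  | [] => []
  | x :: t => runScan x 1 t

def verificar_jugada_alt (dados : List Int) : List String :=
  let s := PySem.List.sorted dados (fun v => v) false
  let runs := runLengths s
  let valores := PySem.List.sorted runs (fun v => v) true
  let jugadas : List String := []
  let jugadas := if PySem.List.pyGetD valores 0 0 = 5 then jugadas ++ ["G"] else jugadas
  let jugadas := if PySem.List.pyGetD valores 0 0 ≥ 4 then jugadas ++ ["P"] else jugadas
  let jugadas := if PySem.List.pyGetD valores 0 0 ≥ 3 ∧ 2 ≤ valores.length ∧ PySem.List.pyGetD valores 1 0 ≥ 2 then jugadas ++ ["F"] else jugadas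
  let jugadas := if runs.length = 5 ∧ PySem.List.pyGetD s (-1) 0 - PySem.List.pyGetD s 0 0 = 4 then jugadas ++ ["E"] else jugadas
  jugadas

-- ===== PRECONDITION & SPEC =====
-- Pre_ excludes only the empty list, on which A (valores[0]) raises IndexError (B raises there too).
def Pre_verificar_jugada (dados : List Int) : Prop := dados ≠ []
instance (dados : List Int) : Decidable (Pre_verificar_jugada dados) := by unfold Pre_verificar_jugada; infer_instance
def pvWitness_verificar_jugada : List Int := [3, 1, 3, 2, 3]

def Spec_verificar_jugada (dados : List Int) (out : List String) : Prop := out = verificar_jugada_alt dados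
instance (dados : List Int) (out : List String) : Decidable (Spec_verificar_jugada dados out) := by unfold Spec_verificar_jugada; infer_instance

-- ===== CLAIM (what is proved, stated in full; the proofs are below) =====
def Claim_equal_verificar_jugada : Prop := ∀ (dados : List Int), Dom_verificar_jugada dados → Pre_verificar_jugada dados → Spec_verificar_jugada dados (verificar_jugada dados)

-- ===== LEMMAS AND PROOFS =====

-- proof-only helper: ordered dedup by repeated filtering (first occurrences)
def dsort : List Int → List Int
  | [] => []
  | x :: t => x :: dsort (t.filter (fun y => y != x))
termination_by l => l.length
decreasing_by
  simp only [List.length_cons, List.length_unattach]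
  exact Nat.lt_succ_of_le (le_trans (List.length_filter_le _ _) (by simp))

theorem dsort_nil : dsort [] = [] := by rw [dsort]

theorem dsort_cons (x : Int) (t : List Int) :
    dsort (x :: t) = x :: dsort (t.filter (fun y => y != x)) := by rw [dsort]

theorem mem_dsort (l : List Int) (x : Int) : x ∈ dsort l ↔ x ∈ l := by
  induction hn : l.length using Nat.strong_induction_on generalizing l with
  | _ n ih =>
    match l with
    | [] => simp [dsort_nil]
    | a :: t =>
      rw [dsort_cons]
      have hlt : (t.filter (fun y => y != a)).length < n := by
        subst hn; simp only [List.length_cons]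
        exact Nat.lt_succ_of_le (List.length_filter_le _ _)
      have ih' := ih _ hlt (t.filter (fun y => y != a)) rfl
      simp only [List.mem_cons, ih', List.mem_filter, bne_iff_ne, ne_eq]
      constructor
      · rintro (rfl | ⟨h, _⟩)
        · exact Or.inl rfl
        · exact Or.inr h
      · rintro (rfl | h)
        · exact Or.inl rfl
        · by_cases hxa : x = a
          · exact Or.inl hxa
          · exact Or.inr ⟨h, hxa⟩

theorem nodup_dsort (l : List Int) : (dsort l).Nodup := by
  induction hn : l.length using Nat.strong_induction_on generalizing l with
  | _ n ih =>
    match l with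
    | [] => simp [dsort_nil]
    | a :: t =>
      rw [dsort_cons]
      have hlt : (t.filter (fun y => y != a)).length < n := by
        subst hn; simp only [List.length_cons]
        exact Nat.lt_succ_of_le (List.length_filter_le _ _)
      refine List.Nodup.cons (fun hmem => ?_) (ih _ hlt _ rfl)
      have := (mem_dsort _ _).mp hmem
      simp [List.mem_filter] at this

theorem runScan_spec (t : List Int) (c n : Int)
    (h : (c :: t).Pairwise (· ≤ ·)) :
    runScan c n t = (n + (t.count c : Int)) ::
      (dsort (t.filter (fun y => y != c))).map (fun k => (t.count k : Int)) := by
  induction t generalizing c n with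
  | nil => simp [runScan, dsort_nil]
  | cons y ys ih =>
    rw [runScan]
    by_cases hyc : y = c
    · subst hyc
      have hsub : (y :: ys).Pairwise (· ≤ · : Int → Int → Prop) := by
        refine h.sublist ?_
        exact List.Sublist.cons₂ _ (List.sublist_cons_self _ _)
      rw [if_pos rfl, ih y (n + 1) hsub]
      have hcnt : ((y :: ys).count y : Int) = (ys.count y : Int) + 1 := by
        simp
      have hfil : (y :: ys).filter (fun z => z != y) = ys.filter (fun z => z != y) := by
        simp
      rw [hfil, hcnt]
      congr 1
      · ring
      · apply List.map_congr_left
        intro k hk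
        have hk' := (mem_dsort _ _).mp hk
        have h2 : ¬ (y = k) := by
          simp only [List.mem_filter, bne_iff_ne, ne_eq] at hk'
          exact fun e => hk'.2 e.symm
        simp [h2]
    · -- y ≠ c : c does not occur in y :: ys
      have hcy : c ≤ y := (List.pairwise_cons.mp h).1 y (by simp)
      have hpair : (y :: ys).Pairwise (· ≤ · : Int → Int → Prop) := (List.pairwise_cons.mp h).2
      have hclt : c < y := lt_of_le_of_ne hcy (fun e => hyc e.symm)
      have hnotin : c ∉ y :: ys := by
        intro hmem
        rcases List.mem_cons.mp hmem with rfl | hmem'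
        · exact hyc rfl
        · have hyc2 := (List.pairwise_cons.mp hpair).1 c hmem'
          exact absurd hyc2 (not_le.mpr hclt)
      rw [if_neg hyc, ih y 1 hpair]
      have hcnt0 : ((y :: ys).count c) = 0 := List.count_eq_zero.mpr hnotin
      have hfil : (y :: ys).filter (fun z => z != c) = y :: ys := by
        apply List.filter_eq_self.mpr
        intro z hz
        simp only [bne_iff_ne, ne_eq]
        intro e; exact hnotin (e ▸ hz)
      rw [hcnt0, hfil, dsort_cons]
      simp only [List.map_cons]
      congr 1
      · push_cast; ring
      congr 1
      · simp; omega
      · apply List.map_congr_left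
        intro k hk
        have hk' := (mem_dsort _ _).mp hk
        have h2 : ¬ (y = k) := by
          simp only [List.mem_filter, bne_iff_ne, ne_eq] at hk'
          exact fun e => hk'.2 e.symm
        simp [h2]

theorem runLengths_sorted (s : List Int) (h : s.Pairwise (· ≤ ·)) :
    runLengths s = (dsort s).map (fun k => (s.count k : Int)) := by
  match s with
  | [] => simp [runLengths, dsort_nil]
  | x :: t =>
    rw [runLengths, runScan_spec t x 1 h, dsort_cons]
    simp only [List.map_cons]
    congr 1
    · simp; ring
    · apply List.map_congr_left
      intro k hk
      have hk' := (mem_dsort _ _).mp hk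
      have h2 : ¬ (x = k) := by
        simp only [List.mem_filter, bne_iff_ne, ne_eq] at hk'
        exact fun e => hk'.2 e.symm
      simp [h2]

theorem conteos_eq_counter (l : List Int) :
    l.foldl (fun d x =>
      let d := if !(d.contains x) then d.insert x 0 else d
      d.insert x (d.getD x 0 + 1)) (PySem.Dict.empty : PySem.Dict Int Int)
    = PySem.Dict.counter l := by
  rw [← PySem.Dict.foldl_insert_getD_add_one_eq_counter]
  congr 1
  funext d x
  by_cases h : d.contains x
  · simp [h]
  · simp only [h, Bool.not_false, if_pos]
    rw [PySem.Dict.getD_insert_self, PySem.Dict.insert_insert_self,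
      PySem.Dict.getD_of_not_contains d 0 (by simp [h])]

theorem valuesA (l : List Int) :
    (PySem.Dict.counter l : PySem.Dict Int Int).values
      = (PySem.Set.ofList l).map (fun k => (l.count k : Int)) := by
  simp only [PySem.Dict.values, PySem.Dict.items_counter, List.map_map]
  rfl

theorem sorted_rev_congr (xs ys : List Int) (h : xs.Perm ys) :
    PySem.List.sorted xs (fun v => v) true = PySem.List.sorted ys (fun v => v) true := by
  refine List.Perm.eq_of_pairwise (le := fun a b => b ≤ a)
    (fun a b _ _ h1 h2 => le_antisymm h2 h1)
    (PySem.List.sorted_pairwise_rev xs (fun v => v))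
    (PySem.List.sorted_pairwise_rev ys (fun v => v))
    (((PySem.List.sorted_perm xs (fun v => v) true).trans h).trans
      (PySem.List.sorted_perm ys (fun v => v) true).symm)

theorem dsort_sorted_perm_ofList (l : List Int) :
    (dsort (PySem.List.sorted l (fun v => v) false)).Perm (PySem.Set.ofList l) := by
  refine (List.perm_ext_iff_of_nodup (nodup_dsort _) (PySem.Set.nodup_ofList l)).mpr ?_
  intro a
  rw [mem_dsort, PySem.List.mem_sorted, PySem.Set.mem_ofList]

theorem valores_eq (l : List Int) :
    PySem.List.sorted ((PySem.Dict.counter l : PySem.Dict Int Int).values) (fun v => v) true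
      = PySem.List.sorted (runLengths (PySem.List.sorted l (fun v => v) false)) (fun v => v) true := by
  rw [valuesA, runLengths_sorted _ (PySem.List.sorted_pairwise l (fun v => v))]
  apply sorted_rev_congr
  have hcnt : (fun k => ((PySem.List.sorted l (fun v => v) false).count k : Int))
      = (fun k => (l.count k : Int)) := by
    funext k
    rw [(PySem.List.sorted_perm l (fun v => v) false).count_eq]
  rw [hcnt]
  exact ((dsort_sorted_perm_ofList l).map _).symm

theorem ofList_ne_nil (l : List Int) (hl : l ≠ []) : PySem.Set.ofList l ≠ [] := by
  match l with
  | [] => exact absurd rfl hl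
  | x :: t =>
    intro he
    have : x ∈ PySem.Set.ofList (x :: t) := (PySem.Set.mem_ofList _ _).mpr (by simp)
    rw [he] at this
    simp at this

theorem head_sorted_eq (l : List Int) (hl : l ≠ []) :
    PySem.List.pyGetD (PySem.List.sorted (PySem.Set.ofList l) (fun v => v) false) 0 0
      = PySem.List.pyGetD (PySem.List.sorted l (fun v => v) false) 0 0 := by
  have hdu : PySem.List.sorted (PySem.Set.ofList l) (fun v => v) false ≠ [] := by
    intro he; rw [PySem.List.sorted_eq_nil_iff] at he; exact ofList_ne_nil l hl he
  have hs : PySem.List.sorted l (fun v => v) false ≠ [] := by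
    intro he; rw [PySem.List.sorted_eq_nil_iff] at he; exact hl he
  rcases hdu' : PySem.List.sorted (PySem.Set.ofList l) (fun v => v) false with _ | ⟨m, t⟩
  · exact absurd hdu' hdu
  rcases hs' : PySem.List.sorted l (fun v => v) false with _ | ⟨m', t'⟩
  · exact absurd hs' hs
  rw [PySem.List.pyGetD_zero_cons, PySem.List.pyGetD_zero_cons]
  have hm : m ∈ l := by
    have : m ∈ PySem.List.sorted (PySem.Set.ofList l) (fun v => v) false := by
      rw [hdu']; simp
    rw [PySem.List.mem_sorted] at this
    exact (PySem.Set.mem_ofList _ _).mp this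
  have hm' : m' ∈ l := by
    have : m' ∈ PySem.List.sorted l (fun v => v) false := by rw [hs']; simp
    rw [PySem.List.mem_sorted] at this
    exact this
  have h1 : m ≤ m' := PySem.List.key_head_sorted_le (PySem.Set.ofList l) (fun v => v) hdu' m'
    ((PySem.Set.mem_ofList _ _).mpr hm')
  have h2 : m' ≤ m := PySem.List.key_head_sorted_le l (fun v => v) hs' m hm
  exact le_antisymm h1 h2

theorem le_getLast_sorted (l : List Int) (y : Int) (hy : y ∈ l)
    (hs : PySem.List.sorted l (fun v => v) false ≠ []) :
    y ≤ (PySem.List.sorted l (fun v => v) false).getLast hs := by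
  have hy' : y ∈ PySem.List.sorted l (fun v => v) false := (PySem.List.mem_sorted _ _ _ _).mpr hy
  obtain ⟨i, hi, he⟩ := List.mem_iff_getElem.mp hy'
  rw [List.getLast_eq_getElem]
  rw [← he]
  exact PySem.List.sorted_id_getElem_mono l (by omega) (by omega)

theorem last_sorted_eq (l : List Int)
    (h5 : (PySem.List.sorted (PySem.Set.ofList l) (fun v => v) false).length = 5) :
    PySem.List.pyGetD (PySem.List.sorted (PySem.Set.ofList l) (fun v => v) false) 4 0
      = PySem.List.pyGetD (PySem.List.sorted l (fun v => v) false) (-1) 0 := by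
  have hl : l ≠ [] := by
    intro he; subst he; simp [PySem.List.length_sorted] at h5
  have hs : PySem.List.sorted l (fun v => v) false ≠ [] := by
    intro he; rw [PySem.List.sorted_eq_nil_iff] at he; exact hl he
  rw [PySem.List.pyGetD_neg_one _ _ hs]
  have h45 : (4 : Nat) < (PySem.List.sorted (PySem.Set.ofList l) (fun v => v) false).length := by omega
  have : PySem.List.pyGetD (PySem.List.sorted (PySem.Set.ofList l) (fun v => v) false) ((4 : Nat) : Int) 0
      = (PySem.List.sorted (PySem.Set.ofList l) (fun v => v) false)[(4 : Nat)] :=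
    PySem.List.pyGetD_ofNat _ 4 0 h45
  rw [show ((4 : Nat) : Int) = (4 : Int) by norm_num] at this
  rw [this]
  -- antisymmetry: both are the maximum of l
  have hmem4 : (PySem.List.sorted (PySem.Set.ofList l) (fun v => v) false)[(4:Nat)] ∈ l := by
    have := List.getElem_mem h45
    rw [PySem.List.mem_sorted] at this
    exact (PySem.Set.mem_ofList _ _).mp this
  have hle : (PySem.List.sorted (PySem.Set.ofList l) (fun v => v) false)[(4:Nat)]
      ≤ (PySem.List.sorted l (fun v => v) false).getLast hs :=
    le_getLast_sorted l _ hmem4 hs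
  have hgemem : (PySem.List.sorted l (fun v => v) false).getLast hs ∈ PySem.List.sorted (PySem.Set.ofList l) (fun v => v) false := by
    rw [PySem.List.mem_sorted, PySem.Set.mem_ofList]
    have := List.getLast_mem hs
    rw [PySem.List.mem_sorted] at this
    exact this
  obtain ⟨j, hj, hje⟩ := List.mem_iff_getElem.mp hgemem
  have hge : (PySem.List.sorted l (fun v => v) false).getLast hs
      ≤ (PySem.List.sorted (PySem.Set.ofList l) (fun v => v) false)[(4:Nat)] := by
    rw [← hje]
    exact PySem.List.sorted_id_getElem_mono (PySem.Set.ofList l) (by omega) h45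
  exact le_antisymm hle hge

theorem runs_length_eq (l : List Int) :
    (PySem.List.sorted (PySem.Set.ofList l) (fun v => v) false).length
      = (runLengths (PySem.List.sorted l (fun v => v) false)).length := by
  rw [PySem.List.length_sorted,
    runLengths_sorted _ (PySem.List.sorted_pairwise l (fun v => v)),
    List.length_map, (dsort_sorted_perm_ofList l).length_eq]

theorem Econd_iff (l : List Int) :
    ((PySem.List.sorted (PySem.Set.ofList l) (fun v => v) false).length = 5 ∧
      PySem.List.pyGetD (PySem.List.sorted (PySem.Set.ofList l) (fun v => v) false) 4 0
        - PySem.List.pyGetD (PySem.List.sorted (PySem.Set.ofList l) (fun v => v) false) 0 0 = 4)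
    ↔ ((runLengths (PySem.List.sorted l (fun v => v) false)).length = 5 ∧
      PySem.List.pyGetD (PySem.List.sorted l (fun v => v) false) (-1) 0
        - PySem.List.pyGetD (PySem.List.sorted l (fun v => v) false) 0 0 = 4) := by
  have hlen := runs_length_eq l
  constructor
  · rintro ⟨h5, hd⟩
    have hl : l ≠ [] := by
      intro he; subst he
      simp [PySem.List.length_sorted] at h5
    exact ⟨hlen ▸ h5, by rw [← last_sorted_eq l h5, ← head_sorted_eq l hl]; exact hd⟩
  · rintro ⟨h5, hd⟩
    have h5' : (PySem.List.sorted (PySem.Set.ofList l) (fun v => v) false).length = 5 :=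
      hlen.trans h5
    have hl : l ≠ [] := by
      intro he; subst he
      simp [PySem.List.length_sorted] at h5'
    exact ⟨h5', by rw [last_sorted_eq l h5', head_sorted_eq l hl]; exact hd⟩

theorem main_eq (l : List Int) : verificar_jugada l = verificar_jugada_alt l := by
  unfold verificar_jugada verificar_jugada_alt
  simp only [conteos_eq_counter, valores_eq]
  exact if_congr (Econd_iff l) rfl rfl

-- ===== VERDICT (by name: the statement is the Claim_ definition above) =====
theorem verificar_jugada_spec : Claim_equal_verificar_jugada := by
  intro dados _ _
  unfold Spec_verificar_jugada
  exact main_eq dados
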